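-- pv_equiv track=rewrite | github.com/AteetVatan/ShotGraph | core/services/style_context.py | _extract_style_keywords
-- ===== SOURCE A (Python) =====
-- def _extract_style_keywords(text: str, summary: str) -> list[str]:
--     """Extract style keywords from scene text.
--
--     Args:
--         text: Full scene text.
--         summary: Scene summary.
--
--     Returns:
--         List of style keywords.
--     """
--     keywords = []
--     combined = (text + " " + summary).lower()
--
--     # Time-related
--     if any(word in combined for word in ["dawn", "sunrise", "morning"]):
--         keywords.append("golden hour")
--     elif any(word in combined for word in ["dusk", "sunset", "evening"]):
--         keywords.append("warm lighting")
--     elif any(word in combined for word in ["night", "midnight", "dark"]):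
--         keywords.append("night scene")
--
--     # Mood-related
--     if any(word in combined for word in ["happy", "joy", "celebrate", "laugh"]):
--         keywords.append("bright colors")
--     elif any(word in combined for word in ["sad", "cry", "mourn", "grief"]):
--         keywords.append("muted colors")
--     elif any(word in combined for word in ["tense", "danger", "threat", "fear"]):
--         keywords.append("dramatic lighting")
--     elif any(word in combined for word in ["peaceful", "calm", "serene"]):
--         keywords.append("soft lighting")
--
--     # Setting-related
--     if any(word in combined for word in ["forest", "woods", "tree"]):
--         keywords.append("natural lighting")
--     elif any(word in combined for word in ["castle", "palace", "throne"]):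
--         keywords.append("grand architecture")
--     elif any(word in combined for word in ["city", "street", "market"]):
--         keywords.append("urban environment")
--
--     return keywords
-- ===== SOURCE B (Python) =====
-- # B: inverted word-index. One flat dict maps every trigger word to (group, priority, tag);
-- # a single scan over the words keeps, per group, the minimum-priority match, then the
-- # result is read out in group order. No per-group if/elif chain and no break.
-- WORD_TO_RULE = {
--     "dawn": (0, 1, "golden hour"), "sunrise": (0, 1, "golden hour"), "morning": (0, 1, "golden hour"),
--     "dusk": (0, 2, "warm lighting"), "sunset": (0, 2, "warm lighting"), "evening": (0, 2, "warm lighting"),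
--     "night": (0, 3, "night scene"), "midnight": (0, 3, "night scene"), "dark": (0, 3, "night scene"),
--     "happy": (1, 1, "bright colors"), "joy": (1, 1, "bright colors"), "celebrate": (1, 1, "bright colors"), "laugh": (1, 1, "bright colors"),
--     "sad": (1, 2, "muted colors"), "cry": (1, 2, "muted colors"), "mourn": (1, 2, "muted colors"), "grief": (1, 2, "muted colors"),
--     "tense": (1, 3, "dramatic lighting"), "danger": (1, 3, "dramatic lighting"), "threat": (1, 3, "dramatic lighting"), "fear": (1, 3, "dramatic lighting"),
--     "peaceful": (1, 4, "soft lighting"), "calm": (1, 4, "soft lighting"), "serene": (1, 4, "soft lighting"),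
--     "forest": (2, 1, "natural lighting"), "woods": (2, 1, "natural lighting"), "tree": (2, 1, "natural lighting"),
--     "castle": (2, 2, "grand architecture"), "palace": (2, 2, "grand architecture"), "throne": (2, 2, "grand architecture"),
--     "city": (2, 3, "urban environment"), "street": (2, 3, "urban environment"), "market": (2, 3, "urban environment"),
-- }
--
--
-- def _extract_style_keywords(text: str, summary: str) -> list[str]:
--     combined = (text + " " + summary).lower()
--     best = {}  # group -> (priority, tag) of the best (lowest-priority) matched rule
--     for word, (group, prio, tag) in WORD_TO_RULE.items():
--         if word in combined:
--             cur = best.get(group)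
--             if cur is None or prio < cur[0]:
--                 best[group] = (prio, tag)
--     return [best[g][1] for g in sorted(best)]
-- ===== Notes on version B (the rewrite author's own statement) =====
-- stated objective: alternative
-- what changed: Inverts the data: a flat word->(group,priority,tag) index is scanned once, keeping the minimum-priority match per group in a dict, and the result is read out in sorted group order, instead of A's three ordered if/elif chains with first-match-wins.
import Mathlib
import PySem

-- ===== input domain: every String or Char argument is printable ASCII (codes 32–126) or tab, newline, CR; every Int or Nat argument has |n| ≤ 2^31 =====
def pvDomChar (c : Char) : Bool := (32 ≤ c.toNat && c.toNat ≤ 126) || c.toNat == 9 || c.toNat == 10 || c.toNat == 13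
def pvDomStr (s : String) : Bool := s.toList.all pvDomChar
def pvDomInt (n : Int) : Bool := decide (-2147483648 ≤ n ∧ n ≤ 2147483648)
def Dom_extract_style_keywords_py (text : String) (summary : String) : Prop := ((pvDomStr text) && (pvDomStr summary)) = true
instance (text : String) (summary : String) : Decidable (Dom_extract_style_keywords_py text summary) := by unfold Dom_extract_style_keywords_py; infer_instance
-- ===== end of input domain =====

-- B inverts the data: one flat word->(group,priority,tag) index scanned once, keeping the
-- minimum-priority match per group in a dict, read out in sorted group order, instead of
-- A's three ordered if/elif chains (objective: alternative).

-- ===== PORT A =====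
-- A's if/elif chains, step for step; 'word in combined' = PySem.Chars.isIn on the lowered char list.
def extract_style_keywords_py (text : String) (summary : String) : List String :=
  let combined : List Char := PySem.Chars.lower (text.toList ++ ' ' :: summary.toList)
  let keywords : List String := []
  let keywords :=
    if (["dawn", "sunrise", "morning"].any (fun w => PySem.Chars.isIn w.toList combined)) then
      keywords ++ ["golden hour"]
    else if (["dusk", "sunset", "evening"].any (fun w => PySem.Chars.isIn w.toList combined)) then
      keywords ++ ["warm lighting"]
    else if (["night", "midnight", "dark"].any (fun w => PySem.Chars.isIn w.toList combined)) then
      keywords ++ ["night scene"]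
    else keywords
  let keywords :=
    if (["happy", "joy", "celebrate", "laugh"].any (fun w => PySem.Chars.isIn w.toList combined)) then
      keywords ++ ["bright colors"]
    else if (["sad", "cry", "mourn", "grief"].any (fun w => PySem.Chars.isIn w.toList combined)) then
      keywords ++ ["muted colors"]
    else if (["tense", "danger", "threat", "fear"].any (fun w => PySem.Chars.isIn w.toList combined)) then
      keywords ++ ["dramatic lighting"]
    else if (["peaceful", "calm", "serene"].any (fun w => PySem.Chars.isIn w.toList combined)) then
      keywords ++ ["soft lighting"]
    else keywords
  let keywords :=
    if (["forest", "woods", "tree"].any (fun w => PySem.Chars.isIn w.toList combined)) then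
      keywords ++ ["natural lighting"]
    else if (["castle", "palace", "throne"].any (fun w => PySem.Chars.isIn w.toList combined)) then
      keywords ++ ["grand architecture"]
    else if (["city", "street", "market"].any (fun w => PySem.Chars.isIn w.toList combined)) then
      keywords ++ ["urban environment"]
    else keywords
  keywords

-- ===== PORT B =====
-- WORD_TO_RULE, in Source B's insertion order (the algorithm's result does not depend on it).
def wordToRule : List (String × Int × Int × String) :=
  [ ("dawn", 0, 1, "golden hour"), ("sunrise", 0, 1, "golden hour"), ("morning", 0, 1, "golden hour"),
    ("dusk", 0, 2, "warm lighting"), ("sunset", 0, 2, "warm lighting"), ("evening", 0, 2, "warm lighting"),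
    ("night", 0, 3, "night scene"), ("midnight", 0, 3, "night scene"), ("dark", 0, 3, "night scene"),
    ("happy", 1, 1, "bright colors"), ("joy", 1, 1, "bright colors"), ("celebrate", 1, 1, "bright colors"), ("laugh", 1, 1, "bright colors"),
    ("sad", 1, 2, "muted colors"), ("cry", 1, 2, "muted colors"), ("mourn", 1, 2, "muted colors"), ("grief", 1, 2, "muted colors"),
    ("tense", 1, 3, "dramatic lighting"), ("danger", 1, 3, "dramatic lighting"), ("threat", 1, 3, "dramatic lighting"), ("fear", 1, 3, "dramatic lighting"),
    ("peaceful", 1, 4, "soft lighting"), ("calm", 1, 4, "soft lighting"), ("serene", 1, 4, "soft lighting"),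
    ("forest", 2, 1, "natural lighting"), ("woods", 2, 1, "natural lighting"), ("tree", 2, 1, "natural lighting"),
    ("castle", 2, 2, "grand architecture"), ("palace", 2, 2, "grand architecture"), ("throne", 2, 2, "grand architecture"),
    ("city", 2, 3, "urban environment"), ("street", 2, 3, "urban environment"), ("market", 2, 3, "urban environment") ]

-- best[group] = (prio, tag) if cur is None or prio < cur[0]
def updBest (g p : Int) (tag : String) (best : PySem.Dict Int (Int × String)) : PySem.Dict Int (Int × String) :=
  match best.get? g with
  | none => best.insert g (p, tag)
  | some cur => if p < cur.1 then best.insert g (p, tag) else best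

-- one loop iteration: 'if word in combined: ...'
def stepBest (combined : List Char) (best : PySem.Dict Int (Int × String))
    (e : String × Int × Int × String) : PySem.Dict Int (Int × String) :=
  if PySem.Chars.isIn e.1.toList combined then updBest e.2.1 e.2.2.1 e.2.2.2 best else best

def extract_style_keywords_py_alt (text : String) (summary : String) : List String :=
  let combined : List Char := PySem.Chars.lower (text.toList ++ ' ' :: summary.toList)
  let best := wordToRule.foldl (stepBest combined) PySem.Dict.empty
  -- [best[g][1] for g in sorted(best)]; best[g] cannot miss (g ∈ keys), "" is unreachable
  (PySem.List.sorted best.keys (fun g => g) false).map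
    (fun g => match best.get? g with | some c => c.2 | none => "")

-- ===== PRECONDITION & SPEC =====
def Spec_extract_style_keywords_py (text : String) (summary : String) (out : List String) : Prop := out = extract_style_keywords_py_alt text summary
instance (text : String) (summary : String) (out : List String) : Decidable (Spec_extract_style_keywords_py text summary out) := by unfold Spec_extract_style_keywords_py; infer_instance

-- ===== CLAIM (what is proved, stated in full; the proofs are below) =====
def Claim_equal_extract_style_keywords_py : Prop := ∀ (text : String) (summary : String), Dom_extract_style_keywords_py text summary → Spec_extract_style_keywords_py text summary (extract_style_keywords_py text summary)

-- ===== LEMMAS AND PROOFS =====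

-- updBest is idempotent
lemma updBest_updBest (g p : Int) (t : String) (d : PySem.Dict Int (Int × String)) :
    updBest g p t (updBest g p t d) = updBest g p t d := by
  unfold updBest
  cases h : d.get? g with
  | none => simp [PySem.Dict.get?_insert_self]
  | some cur =>
    by_cases hp : p < cur.1
    · simp [hp, PySem.Dict.get?_insert_self]
    · simp [h, hp]

-- a run of table entries sharing one rule collapses to a single conditional update
lemma foldl_stepBest_rule (c : List Char) (g p : Int) (t : String) (ws : List String)
    (d : PySem.Dict Int (Int × String)) :
    List.foldl (stepBest c) d (ws.map (fun w => (w, g, p, t))) =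
      if ws.any (fun w => PySem.Chars.isIn w.toList c) then updBest g p t d else d := by
  induction ws generalizing d with
  | nil => simp
  | cons w ws ih =>
    by_cases hw : PySem.Chars.isIn w.toList c
    · by_cases hrest : ws.any (fun w => PySem.Chars.isIn w.toList c)
      · simp [stepBest, hw, hrest, ih, updBest_updBest]
      · simp [stepBest, hw, hrest, ih]
    · simp [stepBest, hw, ih]

lemma wordToRule_segments :
    wordToRule =
      (["dawn", "sunrise", "morning"].map (fun w => (w, (0:Int), (1:Int), "golden hour"))) ++
      (["dusk", "sunset", "evening"].map (fun w => (w, (0:Int), (2:Int), "warm lighting"))) ++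
      (["night", "midnight", "dark"].map (fun w => (w, (0:Int), (3:Int), "night scene"))) ++
      (["happy", "joy", "celebrate", "laugh"].map (fun w => (w, (1:Int), (1:Int), "bright colors"))) ++
      (["sad", "cry", "mourn", "grief"].map (fun w => (w, (1:Int), (2:Int), "muted colors"))) ++
      (["tense", "danger", "threat", "fear"].map (fun w => (w, (1:Int), (3:Int), "dramatic lighting"))) ++
      (["peaceful", "calm", "serene"].map (fun w => (w, (1:Int), (4:Int), "soft lighting"))) ++
      (["forest", "woods", "tree"].map (fun w => (w, (2:Int), (1:Int), "natural lighting"))) ++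
      (["castle", "palace", "throne"].map (fun w => (w, (2:Int), (2:Int), "grand architecture"))) ++
      (["city", "street", "market"].map (fun w => (w, (2:Int), (3:Int), "urban environment"))) := by
  rfl

-- ===== VERDICT (by name: the statement is the Claim_ definition above) =====
set_option maxHeartbeats 1000000 in
theorem extract_style_keywords_py_spec : Claim_equal_extract_style_keywords_py := by
  intro text summary _
  unfold Spec_extract_style_keywords_py extract_style_keywords_py extract_style_keywords_py_alt
  rw [wordToRule_segments]
  simp only [List.foldl_append, foldl_stepBest_rule]
  generalize (["dawn", "sunrise", "morning"].any fun w => PySem.Chars.isIn w.toList (PySem.Chars.lower (text.toList ++ ' ' :: summary.toList))) = b1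
  generalize (["dusk", "sunset", "evening"].any fun w => PySem.Chars.isIn w.toList (PySem.Chars.lower (text.toList ++ ' ' :: summary.toList))) = b2
  generalize (["night", "midnight", "dark"].any fun w => PySem.Chars.isIn w.toList (PySem.Chars.lower (text.toList ++ ' ' :: summary.toList))) = b3
  generalize (["happy", "joy", "celebrate", "laugh"].any fun w => PySem.Chars.isIn w.toList (PySem.Chars.lower (text.toList ++ ' ' :: summary.toList))) = b4
  generalize (["sad", "cry", "mourn", "grief"].any fun w => PySem.Chars.isIn w.toList (PySem.Chars.lower (text.toList ++ ' ' :: summary.toList))) = b5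
  generalize (["tense", "danger", "threat", "fear"].any fun w => PySem.Chars.isIn w.toList (PySem.Chars.lower (text.toList ++ ' ' :: summary.toList))) = b6
  generalize (["peaceful", "calm", "serene"].any fun w => PySem.Chars.isIn w.toList (PySem.Chars.lower (text.toList ++ ' ' :: summary.toList))) = b7
  generalize (["forest", "woods", "tree"].any fun w => PySem.Chars.isIn w.toList (PySem.Chars.lower (text.toList ++ ' ' :: summary.toList))) = b8
  generalize (["castle", "palace", "throne"].any fun w => PySem.Chars.isIn w.toList (PySem.Chars.lower (text.toList ++ ' ' :: summary.toList))) = b9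
  generalize (["city", "street", "market"].any fun w => PySem.Chars.isIn w.toList (PySem.Chars.lower (text.toList ++ ' ' :: summary.toList))) = b10
  revert b1 b2 b3 b4 b5 b6 b7 b8 b9 b10
  decide
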